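-- pv_equiv track=rewrite | github.com/maomyu/teachtools | backend/app/services/writing_service.py | _extract_sentence_bank_from_schema
-- ===== SOURCE A (Python) =====
-- from typing import Any, Dict, Iterable, List, Optional, Tuple
--
-- def _extract_sentence_bank_from_schema(schema: Dict[str, Any]) -> tuple[List[str], List[str]]:
--     sentences: List[str] = []
--     for paragraph in schema.get("paragraphs", []):
--         for slot in paragraph.get("slots", []):
--             sentence = str(slot.get("fallback_pattern") or "").strip()
--             if sentence:
--                 sentences.append(sentence)
--     opening = sentences[: min(3, len(sentences))]
--     closing = sentences[-min(3, len(sentences)):] if sentences else []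
--     return opening, closing
-- ===== SOURCE B (Python) =====
-- from collections import deque
--
-- def _extract_sentence_bank_from_schema(schema):
--     opening = []
--     last3 = deque(maxlen=3)
--     for paragraph in schema.get("paragraphs", []):
--         for slot in paragraph.get("slots", []):
--             sentence = str(slot.get("fallback_pattern") or "").strip()
--             if sentence:
--                 if len(opening) < 3:
--                     opening.append(sentence)
--                 last3.append(sentence)
--     return opening, list(last3)
-- ===== Notes on version B (the rewrite author's own statement) =====
-- stated objective: alternative
-- what changed: Instead of collecting every sentence into one full list and slicing it afterwards, B maintains two bounded windows during the single pass: an 'opening' list that only appends until it holds 3 items, and a deque(maxlen=3) holding the most recent sentences.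
import Mathlib
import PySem

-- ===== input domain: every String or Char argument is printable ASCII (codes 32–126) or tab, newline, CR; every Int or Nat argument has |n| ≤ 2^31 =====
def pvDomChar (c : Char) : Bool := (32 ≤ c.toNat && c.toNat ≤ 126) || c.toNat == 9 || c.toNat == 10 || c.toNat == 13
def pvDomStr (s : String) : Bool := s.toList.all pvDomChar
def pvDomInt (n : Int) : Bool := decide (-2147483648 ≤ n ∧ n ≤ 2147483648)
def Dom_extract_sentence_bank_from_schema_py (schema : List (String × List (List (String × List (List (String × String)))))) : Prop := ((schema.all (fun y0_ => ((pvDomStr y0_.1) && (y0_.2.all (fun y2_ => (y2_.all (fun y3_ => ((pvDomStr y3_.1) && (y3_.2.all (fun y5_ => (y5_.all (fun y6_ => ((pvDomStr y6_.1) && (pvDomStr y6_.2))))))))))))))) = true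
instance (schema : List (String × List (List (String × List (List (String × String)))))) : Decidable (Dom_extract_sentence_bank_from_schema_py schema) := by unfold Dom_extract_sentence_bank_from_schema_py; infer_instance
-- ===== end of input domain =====

-- ===== PORT A =====
-- B keeps the same single pass but maintains two bounded windows (first-3 list, last-3 deque) instead of a full sentence list plus slicing (objective: alternative).
-- helper: sentence = str(slot.get("fallback_pattern") or "").strip()   (shared by both ports; both Pythons contain this exact line)
def pvSent (slot : List (String × String)) : String :=
  PySem.Str.strip (((PySem.Dict.mk slot).get? "fallback_pattern").getD "")

def extract_sentence_bank_from_schema_py (schema : List (String × List (List (String × List (List (String × String)))))) : List String × List String :=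
  let sentences : List String :=
    ((PySem.Dict.mk schema).getD "paragraphs" []).foldl (fun acc paragraph =>
      ((PySem.Dict.mk paragraph).getD "slots" []).foldl (fun acc slot =>
        let sentence := pvSent slot
        if sentence ≠ "" then acc ++ [sentence] else acc) acc) []
  let opening := PySem.List.slice sentences none (some ((min 3 sentences.length : Nat) : Int))
  let closing := if sentences ≠ [] then PySem.List.slice sentences (some (-((min 3 sentences.length : Nat) : Int))) none else []
  (opening, closing)

-- ===== PORT B =====
-- one sentence arriving: append to opening only while it has < 3 items; deque(maxlen=3).append
def pvStep (st : List String × List String) (s : String) : List String × List String :=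
  let o := if st.1.length < 3 then st.1 ++ [s] else st.1
  let d := st.2 ++ [s]
  (o, if 3 < d.length then d.tail else d)

def extract_sentence_bank_from_schema_py_alt (schema : List (String × List (List (String × List (List (String × String)))))) : List String × List String :=
  let st : List String × List String :=
    ((PySem.Dict.mk schema).getD "paragraphs" []).foldl (fun st paragraph =>
      ((PySem.Dict.mk paragraph).getD "slots" []).foldl (fun st slot =>
        let sentence := pvSent slot
        if sentence ≠ "" then pvStep st sentence else st) st) ([], [])
  (st.1, st.2)

-- ===== PRECONDITION & SPEC =====
def Spec_extract_sentence_bank_from_schema_py (schema : List (String × List (List (String × List (List (String × String)))))) (out : List String × List String) : Prop := out = extract_sentence_bank_from_schema_py_alt schema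
instance (schema : List (String × List (List (String × List (List (String × String)))))) (out : List String × List String) : Decidable (Spec_extract_sentence_bank_from_schema_py schema out) := by unfold Spec_extract_sentence_bank_from_schema_py; infer_instance

-- ===== CLAIM (what is proved, stated in full; the proofs are below) =====
def Claim_equal_extract_sentence_bank_from_schema_py : Prop := ∀ (schema : List (String × List (List (String × List (List (String × String)))))), Dom_extract_sentence_bank_from_schema_py schema → Spec_extract_sentence_bank_from_schema_py schema (extract_sentence_bank_from_schema_py schema)

-- ===== LEMMAS AND PROOFS =====
-- invariant linking B's bounded state to A's full sentence list
def pvInv (S : List String) (st : List String × List String) : Prop :=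
  st.1 = S.take 3 ∧ st.2 = S.drop (S.length - 3)

theorem pvStep_inv (S : List String) (st : List String × List String) (s : String)
    (h : pvInv S st) : pvInv (S ++ [s]) (pvStep st s) := by
  obtain ⟨h1, h2⟩ := h
  constructor
  · simp only [pvStep, h1]
    by_cases hl : S.length < 3
    · have hfull : (S ++ [s]).take 3 = S ++ [s] := List.take_of_length_le (by simp; omega)
      have hS : S.take 3 = S := List.take_of_length_le (by omega)
      simp [hS, hl, hfull]
    · have h3 : ¬ (S.take 3).length < 3 := by simp [List.length_take]; omega
      rw [if_neg h3, List.take_append_of_le_length (by omega)]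
  · simp only [pvStep, h2]
    by_cases hl : 3 ≤ S.length
    · have hlen : 3 < (S.drop (S.length - 3) ++ [s]).length := by simp; omega
      rw [if_pos hlen, List.tail_append_of_ne_nil (by
          intro hc; have := congrArg List.length hc; simp at this; omega),
        List.tail_drop, show (S ++ [s]).length - 3 = S.length - 3 + 1 by simp; omega,
        List.drop_append_of_le_length (by omega)]
    · have hlen : ¬ 3 < (S.drop (S.length - 3) ++ [s]).length := by
        simp [List.length_drop]; omega
      simp only [if_neg hlen]
      rw [show S.length - 3 = 0 by omega, show (S ++ [s]).length - 3 = 0 by simp; omega]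
      simp

theorem pvSlots_inv (l : List (List (String × String))) (S : List String)
    (st : List String × List String) (h : pvInv S st) :
    pvInv (l.foldl (fun acc slot => if pvSent slot ≠ "" then acc ++ [pvSent slot] else acc) S)
      (l.foldl (fun st slot => if pvSent slot ≠ "" then pvStep st (pvSent slot) else st) st) := by
  induction l generalizing S st with
  | nil => exact h
  | cons x xs ih =>
    simp only [List.foldl_cons]
    by_cases hx : pvSent x ≠ ""
    · simp only [if_pos hx]; exact ih _ _ (pvStep_inv S st _ h)
    · simp only [if_neg hx]; exact ih _ _ h

theorem pvPars_inv (l : List (List (String × List (List (String × String))))) (S : List String)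
    (st : List String × List String) (h : pvInv S st) :
    pvInv (l.foldl (fun acc paragraph =>
        ((PySem.Dict.mk paragraph).getD "slots" []).foldl
          (fun acc slot => if pvSent slot ≠ "" then acc ++ [pvSent slot] else acc) acc) S)
      (l.foldl (fun st paragraph =>
        ((PySem.Dict.mk paragraph).getD "slots" []).foldl
          (fun st slot => if pvSent slot ≠ "" then pvStep st (pvSent slot) else st) st) st) := by
  induction l generalizing S st with
  | nil => exact h
  | cons x xs ih =>
    simp only [List.foldl_cons]
    exact ih _ _ (pvSlots_inv _ S st h)

theorem pvOpening (F : List String) :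
    PySem.List.slice F none (some ((min 3 F.length : Nat) : Int)) = F.take 3 := by
  rw [PySem.List.slice_to_natCast, ← List.take_take, List.take_length]

theorem pvClosing (F : List String) :
    (if F ≠ [] then PySem.List.slice F (some (-((min 3 F.length : Nat) : Int))) none else [])
      = F.drop (F.length - 3) := by
  by_cases hS : F = []
  · simp [hS]
  · rw [if_pos hS, PySem.List.slice_from_neg_natCast _ _
      (by have := List.length_pos_of_ne_nil hS; omega)]
    congr 1
    omega

-- ===== VERDICT (by name: the statement is the Claim_ definition above) =====
theorem extract_sentence_bank_from_schema_py_spec : Claim_equal_extract_sentence_bank_from_schema_py := by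
  intro schema _
  obtain ⟨h1, h2⟩ := pvPars_inv ((PySem.Dict.mk schema).getD "paragraphs" []) [] ([], []) ⟨rfl, rfl⟩
  unfold Spec_extract_sentence_bank_from_schema_py
  simp only [extract_sentence_bank_from_schema_py, extract_sentence_bank_from_schema_py_alt,
    Prod.mk.injEq]
  constructor
  · rw [h1]; exact pvOpening _
  · rw [h2]; exact pvClosing _
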